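-- pv_equiv track=rewrite | github.com/SummerXIATIAN/wdps_asg1_group27 | functions.py | get_HTML
-- ===== SOURCE A (Python) =====
-- def get_HTML(payload, key):
--     html = ''
--     flag = 0
--     for line in payload.splitlines():
--         if line.startswith(key):
--             flag = 1
--         if flag == 1:
--             html += line
--     return html
-- ===== SOURCE B (Python) =====
-- def get_HTML(payload, key):
--     lines = payload.splitlines()
--     for i, line in enumerate(lines):
--         if line.startswith(key):
--             return ''.join(lines[i:])
--     return ''
-- ===== Notes on version B (the rewrite author's own statement) =====
-- stated objective: idiomatic
-- what changed: B locates the first matching line's index and returns ''.join of the tail slice, instead of A's single pass latching a flag and concatenating string-by-string.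
import Mathlib
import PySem

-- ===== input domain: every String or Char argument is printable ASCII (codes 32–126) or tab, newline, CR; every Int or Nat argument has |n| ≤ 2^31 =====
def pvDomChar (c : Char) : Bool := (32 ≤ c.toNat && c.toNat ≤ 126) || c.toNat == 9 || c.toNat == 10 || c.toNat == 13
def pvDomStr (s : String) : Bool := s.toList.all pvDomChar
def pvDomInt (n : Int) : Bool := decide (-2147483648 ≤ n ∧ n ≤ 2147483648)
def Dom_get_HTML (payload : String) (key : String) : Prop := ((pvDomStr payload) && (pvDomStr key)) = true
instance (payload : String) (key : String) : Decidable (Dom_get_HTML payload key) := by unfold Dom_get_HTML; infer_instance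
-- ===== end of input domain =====

-- B replaces A's one-pass latched-flag accumulation by locate-first-match-then-join-the-tail; objective: idiomatic.

-- ===== PORT A =====
-- for line in payload.splitlines(): if line.startswith(key): flag = 1; if flag == 1: html += line
-- (html accumulated as List Char; += line appends line's characters)
def get_HTML_step (key : String) (st : List Char × Int) (line : String) : List Char × Int :=
  let flag : Int := if PySem.Str.startswith line key then 1 else st.2
  (if flag = 1 then st.1 ++ line.toList else st.1, flag)

def get_HTML (payload : String) (key : String) : String :=
  String.ofList ((PySem.Str.splitlines payload).foldl (get_HTML_step key) ([], 0)).1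

-- ===== PORT B =====
-- scan for the first line starting with key; join the tail slice from there
def get_HTML_altGo (key : String) : List String → String
  | [] => ""
  | l :: rest =>
      if PySem.Str.startswith l key then PySem.Str.join "" (l :: rest)
      else get_HTML_altGo key rest

def get_HTML_alt (payload : String) (key : String) : String :=
  get_HTML_altGo key (PySem.Str.splitlines payload)

-- ===== PRECONDITION & SPEC =====
def Spec_get_HTML (payload : String) (key : String) (out : String) : Prop := out = get_HTML_alt payload key
instance (payload : String) (key : String) (out : String) : Decidable (Spec_get_HTML payload key out) := by unfold Spec_get_HTML; infer_instance

-- ===== CLAIM =====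
def Claim_equal_get_HTML : Prop := ∀ (payload : String) (key : String), Dom_get_HTML payload key → Spec_get_HTML payload key (get_HTML payload key)

-- ===== LEMMAS AND PROOFS =====

theorem pv_inter_nil (ls : List (List Char)) : ([] : List Char).intercalate ls = ls.flatten := by
  induction ls with
  | nil => rfl
  | cons a ls ih =>
      cases ls with
      | nil => simp [List.intercalate]
      | cons b ls => simp_all [List.intercalate, List.intersperse]

theorem pv_join_nil_cons (a : List Char) (ls : List (List Char)) :
    PySem.Chars.join [] (a :: ls) = a ++ PySem.Chars.join [] ls := by
  simp [PySem.Chars.join, pv_inter_nil]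

theorem pv_join_toList (lines : List String) :
    (PySem.Str.join "" lines).toList = (lines.map String.toList).flatten := by
  simp [PySem.Str.join, PySem.Chars.join, pv_inter_nil]

theorem pv_ofList_eq {a : List Char} {s : String} (h : a = s.toList) : String.ofList a = s := by
  subst h; simp

theorem pv_step_pos (key : String) (st : List Char × Int) (line : String)
    (h : PySem.Chars.startswith line.toList key.toList = true) :
    get_HTML_step key st line = (st.1 ++ line.toList, 1) := by
  simp [get_HTML_step, h]

theorem pv_step_neg0 (key : String) (a : List Char) (line : String)
    (h : ¬ PySem.Chars.startswith line.toList key.toList = true) :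
    get_HTML_step key (a, 0) line = (a, 0) := by
  simp [get_HTML_step, h]

theorem foldl_flag_one (key : String) (lines : List String) (acc : List Char) :
    lines.foldl (get_HTML_step key) (acc, 1)
      = (acc ++ (PySem.Str.join "" lines).toList, 1) := by
  induction lines generalizing acc with
  | nil => simp
  | cons l rest ih =>
      have hstep : get_HTML_step key (acc, 1) l = (acc ++ l.toList, 1) := by
        simp [get_HTML_step, ite_self]
      rw [List.foldl_cons, hstep, ih, pv_join_toList, pv_join_toList]
      simp

theorem foldl_eq_altGo (key : String) (lines : List String) :
    String.ofList (lines.foldl (get_HTML_step key) ([], 0)).1 = get_HTML_altGo key lines := by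
  induction lines with
  | nil => rfl
  | cons l rest ih =>
      by_cases h : PySem.Chars.startswith l.toList key.toList = true
      · rw [List.foldl_cons, pv_step_pos key _ _ h, foldl_flag_one]
        have h2 : get_HTML_altGo key (l :: rest) = PySem.Str.join "" (l :: rest) := by
          simp [get_HTML_altGo, h]
        rw [h2]
        exact pv_ofList_eq (by simp [pv_join_nil_cons])
      · rw [List.foldl_cons, pv_step_neg0 key _ _ h]
        have : get_HTML_altGo key (l :: rest) = get_HTML_altGo key rest := by
          simp [get_HTML_altGo, h]
        rw [this]
        exact ih

-- ===== VERDICT =====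
theorem get_HTML_spec : Claim_equal_get_HTML := by
  intro payload key _
  unfold Spec_get_HTML get_HTML get_HTML_alt
  exact foldl_eq_altGo key (PySem.Str.splitlines payload)
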